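-- pv_equiv track=rewrite | github.com/ElenaCherpakova/codewars | 7-kyu/yoga-class/yoga-class.py | yoga
-- ===== SOURCE A (Python) =====
-- def yoga(classroom, poses):
--     count = 0
--     for row in classroom:
--         row_sum = sum(row)
--         for p in row:
--             for pose in poses:
--                 if row_sum + p >= pose:
--                     count += 1
--     return count
-- ===== SOURCE B (Python) =====
-- def yoga(classroom, poses):
--     sp = sorted(poses)
--     n = len(sp)
--     total = 0
--     for row in classroom:
--         rs = sum(row)
--         for p in row:
--             x = rs + p
--             lo, hi = 0, n
--             while lo < hi:
--                 mid = (lo + hi) // 2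
--                 if sp[mid] <= x:
--                     lo = mid + 1
--                 else:
--                     hi = mid
--             total += lo
--     return total
-- ===== Notes on version B (the rewrite author's own statement) =====
-- stated objective: faster
-- what changed: B sorts poses once and replaces A's inner scan over all poses with a hand-written binary search (bisect_right) counting poses <= row_sum+p, O((R*C+P) log P) instead of O(R*C*P).
import Mathlib
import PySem

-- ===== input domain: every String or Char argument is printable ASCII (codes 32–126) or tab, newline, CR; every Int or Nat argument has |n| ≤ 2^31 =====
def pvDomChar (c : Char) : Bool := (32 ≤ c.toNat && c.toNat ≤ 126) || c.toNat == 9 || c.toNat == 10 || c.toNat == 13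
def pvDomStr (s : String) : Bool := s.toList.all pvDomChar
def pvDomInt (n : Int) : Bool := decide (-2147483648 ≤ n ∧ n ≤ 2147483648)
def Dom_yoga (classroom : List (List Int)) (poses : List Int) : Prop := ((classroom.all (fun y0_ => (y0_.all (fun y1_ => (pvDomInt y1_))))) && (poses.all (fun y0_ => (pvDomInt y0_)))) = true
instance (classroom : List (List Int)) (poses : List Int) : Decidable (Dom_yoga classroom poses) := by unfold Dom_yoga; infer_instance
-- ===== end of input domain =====

-- B replaces A's inner scan over all poses by a one-off sort of poses plus a binary search
-- (bisect_right) per element; return value only, no mutation.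

-- ===== PORT A =====
def yoga (classroom : List (List Int)) (poses : List Int) : Int :=
  classroom.foldl (fun count row =>
    let row_sum : Int := row.foldl (· + ·) 0
    row.foldl (fun c p =>
      poses.foldl (fun c2 pose => if row_sum + p ≥ pose then c2 + 1 else c2) c) count) 0

-- ===== PORT B =====
-- the hand-written while-loop binary search of Source B (lo/hi, mid = (lo+hi)//2)
def brLoop (sp : List Int) (x : Int) (lo hi : Nat) : Nat :=
  if _h : lo < hi then
    if sp.getD ((lo + hi) / 2) 0 ≤ x then brLoop sp x ((lo + hi) / 2 + 1) hi
    else brLoop sp x lo ((lo + hi) / 2)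
  else lo
termination_by hi - lo
decreasing_by all_goals omega

def yoga_alt (classroom : List (List Int)) (poses : List Int) : Int :=
  let sp := PySem.List.sorted poses (fun x => x) false
  let n := sp.length
  classroom.foldl (fun total row =>
    let rs : Int := row.foldl (· + ·) 0
    row.foldl (fun t p => t + (brLoop sp (rs + p) 0 n : Int)) total) 0

-- ===== PRECONDITION & SPEC =====
def Spec_yoga (classroom : List (List Int)) (poses : List Int) (out : Int) : Prop := out = yoga_alt classroom poses
instance (classroom : List (List Int)) (poses : List Int) (out : Int) : Decidable (Spec_yoga classroom poses out) := by unfold Spec_yoga; infer_instance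

-- ===== CLAIM (what is proved, stated in full; the proofs are below) =====
def Claim_equal_yoga : Prop := ∀ (classroom : List (List Int)) (poses : List Int), Dom_yoga classroom poses → Spec_yoga classroom poses (yoga classroom poses)

-- ===== LEMMAS AND PROOFS =====

-- binary-search invariant: if everything below lo satisfies ≤ x and everything from hi on is > x,
-- the loop returns a cut point k with the same two properties and lo ≤ k ≤ hi.
theorem brLoop_cut (sp : List Int) (x : Int)
    (hs : sp.Pairwise (fun a b => a ≤ b)) :
    ∀ n lo hi, hi - lo = n → lo ≤ hi → hi ≤ sp.length →
    (∀ j (hj : j < sp.length), j < lo → sp[j] ≤ x) →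
    (∀ j (hj : j < sp.length), hi ≤ j → x < sp[j]) →
    (brLoop sp x lo hi ≤ sp.length ∧
      (∀ j (hj : j < sp.length), j < brLoop sp x lo hi → sp[j] ≤ x) ∧
      (∀ j (hj : j < sp.length), brLoop sp x lo hi ≤ j → x < sp[j])) := by
  intro n
  induction n using Nat.strong_induction_on with
  | _ n ih =>
    intro lo hi hn hlh hhl hlow hhigh
    rw [brLoop]
    split
    · next h =>
      have hmid1 : (lo + hi) / 2 < hi := by omega
      have hmid2 : lo ≤ (lo + hi) / 2 := by omega
      have hmidlen : (lo + hi) / 2 < sp.length := by omega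
      have hget : sp.getD ((lo + hi) / 2) 0 = sp[(lo + hi) / 2] := by
        simp [List.getD_eq_getElem?_getD, List.getElem?_eq_getElem hmidlen]
      have hpw := List.pairwise_iff_getElem.mp hs
      split
      · next hle =>
        rw [hget] at hle
        refine ih (hi - ((lo + hi) / 2 + 1)) (by omega) _ _ rfl (by omega) hhl ?_ hhigh
        intro j hj hjlt
        rcases Nat.lt_or_ge j lo with hc | hc
        · exact hlow j hj hc
        · rcases Nat.eq_or_lt_of_le (Nat.le_of_lt_succ hjlt) with he | hlt
          · subst he; exact hle
          · exact le_trans (hpw j ((lo + hi) / 2) hj hmidlen hlt) hle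
      · next hgt =>
        rw [hget] at hgt
        push Not at hgt
        refine ih ((lo + hi) / 2 - lo) (by omega) _ _ rfl (by omega) (by omega) hlow ?_
        intro j hj hjge
        rcases Nat.eq_or_lt_of_le hjge with he | hlt
        · subst he; exact hgt
        · exact lt_of_lt_of_le hgt (hpw ((lo + hi) / 2) j hmidlen hj hlt)
    · next h =>
      have : lo = hi := by omega
      subst this
      exact ⟨by omega, fun j hj hjl => hlow j hj hjl, fun j hj hjg => hhigh j hj hjg⟩

-- a cut point determines the count of elements ≤ x
theorem countP_of_cut (sp : List Int) (x : Int) (k : Nat)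
    (hk : k ≤ sp.length)
    (hlo : ∀ j (hj : j < sp.length), j < k → sp[j] ≤ x)
    (hhi : ∀ j (hj : j < sp.length), k ≤ j → x < sp[j]) :
    sp.countP (fun a => decide (a ≤ x)) = k := by
  have hsplit : sp = sp.take k ++ sp.drop k := (List.take_append_drop k sp).symm
  rw [hsplit, List.countP_append]
  have h1 : (sp.take k).countP (fun a => decide (a ≤ x)) = k := by
    rw [List.countP_eq_length.mpr, List.length_take_of_le hk]
    intro a ha
    obtain ⟨j, hj, rfl⟩ := List.getElem_of_mem ha
    rw [List.getElem_take]
    simp only [List.length_take] at hj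
    exact decide_eq_true (hlo j (by omega) (by omega))
  have h2 : (sp.drop k).countP (fun a => decide (a ≤ x)) = 0 := by
    rw [List.countP_eq_zero]
    intro a ha
    obtain ⟨j, hj, rfl⟩ := List.getElem_of_mem ha
    rw [List.getElem_drop]
    simp only [List.length_drop] at hj
    simp only [decide_eq_true_eq]
    exact not_le.mpr (hhi (k + j) (by omega) (by omega))
  omega

theorem brLoop_eq_countP (poses : List Int) (x : Int) :
    (brLoop (PySem.List.sorted poses (fun y => y) false) x 0
        (PySem.List.sorted poses (fun y => y) false).length : Int)
      = (poses.countP (fun a => decide (a ≤ x)) : Int) := by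
  set sp := PySem.List.sorted poses (fun y => y) false with hsp
  have hs : sp.Pairwise (fun a b => a ≤ b) := PySem.List.sorted_pairwise poses (fun y => y)
  obtain ⟨hk, hlo, hhi⟩ := brLoop_cut sp x hs sp.length 0 sp.length rfl (Nat.zero_le _)
    le_rfl (by omega) (by intro j hj hjj; omega)
  have hc := countP_of_cut sp x _ hk hlo hhi
  have hperm : sp.Perm poses := PySem.List.sorted_perm poses (fun y => y) false
  rw [hperm.countP_eq] at hc
  exact_mod_cast hc.symm

-- A's inner loop over poses adds exactly the count of poses ≤ x
theorem inner_foldl_eq (poses : List Int) (x : Int) :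
    ∀ c : Int, poses.foldl (fun c2 pose => if x ≥ pose then c2 + 1 else c2) c
      = c + (poses.countP (fun a => decide (a ≤ x)) : Int) := by
  induction poses with
  | nil => intro c; simp
  | cons q t ihq =>
    intro c
    simp only [List.foldl_cons, List.countP_cons]
    by_cases h : q ≤ x
    · rw [if_pos (by exact h), ihq]
      simp [h]; ring
    · rw [if_neg (by exact h), ihq]
      simp [h]

theorem row_foldl_eq (poses : List Int) (rs : Int) (row : List Int) :
    ∀ c : Int,
    row.foldl (fun c p =>
        poses.foldl (fun c2 pose => if rs + p ≥ pose then c2 + 1 else c2) c) c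
      = row.foldl (fun t p => t + (brLoop (PySem.List.sorted poses (fun y => y) false) (rs + p) 0
            (PySem.List.sorted poses (fun y => y) false).length : Int)) c := by
  induction row with
  | nil => intro c; rfl
  | cons p t ihp =>
    intro c
    simp only [List.foldl_cons]
    rw [inner_foldl_eq, brLoop_eq_countP, ihp]

-- ===== VERDICT (by name: the statement is the Claim_ definition above) =====
theorem outer_foldl_eq (poses : List Int) (classroom : List (List Int)) :
    ∀ acc : Int,
    classroom.foldl (fun count row =>
        let row_sum : Int := row.foldl (· + ·) 0
        row.foldl (fun c p =>
          poses.foldl (fun c2 pose => if row_sum + p ≥ pose then c2 + 1 else c2) c) count) acc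
      = classroom.foldl (fun total row =>
        let rs : Int := row.foldl (· + ·) 0
        row.foldl (fun t p => t + (brLoop (PySem.List.sorted poses (fun y => y) false) (rs + p) 0
              (PySem.List.sorted poses (fun y => y) false).length : Int)) total) acc := by
  induction classroom with
  | nil => intro acc; rfl
  | cons r t ih =>
    intro acc
    simp only [List.foldl_cons]
    rw [row_foldl_eq, ih]

theorem yoga_spec : Claim_equal_yoga := by
  intro classroom poses _hdom
  unfold Spec_yoga yoga yoga_alt
  exact outer_foldl_eq poses classroom 0
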